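-- pv_equiv track=rewrite | github.com/EdOoO21/codes-python | 1st module py/L 4th/A.py | square_fibonacci
-- ===== SOURCE A (Python) =====
-- def square_fibonacci(n):
--     a = []
--     for i in range(n):
--         if i <= 1:
--             a.append(1)
--             yield 1
--         else:
--             a.append(a[i-2] + a[i-1])
--             yield (a[i-2] + a[i-1])**2
-- ===== SOURCE B (Python) =====
-- def square_fibonacci(n):
--     def fib(k):
--         # fast doubling: returns (F(k), F(k+1)) with F(1)=F(2)=1
--         if k == 0:
--             return (0, 1)
--         f, g = fib(k // 2)
--         c = f * (2 * g - f)
--         d = f * f + g * g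
--         if k % 2:
--             return (d, c + d)
--         return (c, d)
--     for i in range(n):
--         yield fib(i + 1)[0] ** 2
-- ===== Notes on version B (the rewrite author's own statement) =====
-- stated objective: alternative
-- what changed: B computes each output term independently as the square of the corresponding Fibonacci number via recursive fast doubling (whose value at the first two indices already equals the yielded base value, so the index branch disappears), instead of A's sequential recurrence over a growing list indexed back two positions.
import Mathlib
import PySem

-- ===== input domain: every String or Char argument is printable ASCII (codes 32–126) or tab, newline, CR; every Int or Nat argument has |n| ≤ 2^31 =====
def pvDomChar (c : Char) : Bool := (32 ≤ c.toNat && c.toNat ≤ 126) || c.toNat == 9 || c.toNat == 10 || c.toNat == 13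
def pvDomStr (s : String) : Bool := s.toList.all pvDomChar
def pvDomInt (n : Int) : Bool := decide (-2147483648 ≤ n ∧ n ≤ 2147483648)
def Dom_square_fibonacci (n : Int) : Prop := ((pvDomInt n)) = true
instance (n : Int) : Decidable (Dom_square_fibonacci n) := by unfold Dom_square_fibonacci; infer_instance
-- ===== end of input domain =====

-- B computes each output independently as F(i+1)^2 by recursive fast doubling, instead of A's
-- sequential recurrence over a growing list; same yielded sequence (generators compared as the
-- list of yielded values). Objective: alternative algorithm.

-- ===== PORT A =====
-- state: (a, out) = (the list A appends to, the list of yielded values)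
def pvStepA (st : List Int × List Int) (i : Int) : List Int × List Int :=
  if i ≤ 1 then (st.1 ++ [1], st.2 ++ [1])
  else
    let v := PySem.List.pyGetD st.1 (i - 2) 0 + PySem.List.pyGetD st.1 (i - 1) 0
    (st.1 ++ [v], st.2 ++ [v ^ 2])

def square_fibonacci (n : Int) : List Int :=
  ((PySem.List.pyRange 0 n 1).foldl pvStepA ([], [])).2

-- ===== PORT B =====
-- fib(k): Python's fast-doubling helper, returning (F(k), F(k+1)).  It is only called with
-- k = i + 1 ≥ 1 for i in range(n), so the argument is a nonnegative int and we port it over Nat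
-- (for a Nat argument Python's k // 2 and k % 2 coincide with Lean's k / 2 and k % 2).
def pvFibFD : Nat → Int × Int
  | 0 => (0, 1)
  | (k + 1) =>
    let fg := pvFibFD ((k + 1) / 2)
    let f := fg.1
    let g := fg.2
    let c := f * (2 * g - f)
    let d := f * f + g * g
    if (k + 1) % 2 = 1 then (d, c + d) else (c, d)
  decreasing_by exact Nat.div_lt_self (Nat.succ_pos k) (by norm_num)

def square_fibonacci_alt (n : Int) : List Int :=
  (PySem.List.pyRange 0 n 1).map (fun i => (pvFibFD (i + 1).toNat).1 ^ 2)

-- ===== PRECONDITION & SPEC =====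
def Spec_square_fibonacci (n : Int) (out : List Int) : Prop := out = square_fibonacci_alt n
instance (n : Int) (out : List Int) : Decidable (Spec_square_fibonacci n out) := by unfold Spec_square_fibonacci; infer_instance

-- ===== CLAIM (what is proved, stated in full; the proofs are below) =====
def Claim_equal_square_fibonacci : Prop := ∀ (n : Int), Dom_square_fibonacci n → Spec_square_fibonacci n (square_fibonacci n)

-- ===== LEMMAS AND PROOFS =====

-- fast doubling computes Fibonacci
theorem pvFibFD_eq : ∀ (k : Nat), pvFibFD k = ((Nat.fib k : Int), (Nat.fib (k + 1) : Int)) := by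
  intro k
  induction k using Nat.strong_induction_on with
  | _ k ih =>
    match k with
    | 0 => simp [pvFibFD]
    | k + 1 =>
      rw [pvFibFD]
      have hlt : (k + 1) / 2 < k + 1 := Nat.div_lt_self (Nat.succ_pos k) (by norm_num)
      rw [ih _ hlt]
      set m := (k + 1) / 2 with hm
      have hle : Nat.fib m ≤ 2 * Nat.fib (m + 1) :=
        le_trans (Nat.fib_le_fib_succ) (by omega)
      have hc : ((Nat.fib m : Int)) * (2 * (Nat.fib (m + 1) : Int) - (Nat.fib m : Int))
          = (Nat.fib (2 * m) : Int) := by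
        rw [Nat.fib_two_mul]
        push_cast [Nat.cast_sub hle]
        ring
      have hd : (Nat.fib m : Int) * (Nat.fib m : Int) + (Nat.fib (m + 1) : Int) * (Nat.fib (m + 1) : Int)
          = (Nat.fib (2 * m + 1) : Int) := by
        rw [Nat.fib_two_mul_add_one]
        push_cast
        ring
      by_cases hpar : (k + 1) % 2 = 1
      · have hk : k + 1 = 2 * m + 1 := by omega
        simp only [if_pos hpar, hc, hd]
        rw [hk]
        have h2 : Nat.fib (2 * m + 1 + 1) = Nat.fib (2 * m) + Nat.fib (2 * m + 1) :=
          Nat.fib_add_two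
        rw [h2]
        push_cast
        ring_nf
      · have hk : k + 1 = 2 * m := by omega
        simp only [if_neg hpar, hc, hd]
        rw [hk]

-- reference sequence produced by A's loop body from index 2 on: squares of successive sums
def pvSq : Nat → Int → Int → List Int
  | 0, _, _ => []
  | m + 1, x, y => (x + y) * (x + y) :: pvSq m y (x + y)

theorem pvSq_fib : ∀ (m k : Nat),
    pvSq m (Nat.fib (k + 1) : Int) (Nat.fib (k + 2) : Int)
      = (List.range m).map (fun j => ((Nat.fib (k + 3 + j) : Int)) ^ 2) := by
  intro m
  induction m with
  | zero => intro k; simp [pvSq]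
  | succ m ih =>
      intro k
      have hfib : (Nat.fib (k + 1) : Int) + (Nat.fib (k + 2) : Int) = (Nat.fib (k + 3) : Int) := by
        have h : Nat.fib (k + 1 + 2) = Nat.fib (k + 1) + Nat.fib (k + 1 + 1) := Nat.fib_add_two
        have h2 : k + 1 + 2 = k + 3 := by omega
        have h3 : k + 1 + 1 = k + 2 := by omega
        rw [h2, h3] at h
        simp [h]
      have e1 : k + 2 = k + 1 + 1 := by omega
      have e2 : k + 3 = k + 1 + 2 := by omega
      rw [pvSq, hfib, e2, e1, ih (k + 1), List.range_succ_eq_map, List.map_cons, List.map_map]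
      congr 1
      · ring
      · refine List.map_congr_left fun j _ => ?_
        simp only [Function.comp]
        have e3 : k + 1 + 3 + j = k + 1 + 2 + j.succ := by omega
        rw [e3]

-- A's loop from index 2 on, with a = P ++ [x, y] already built
theorem pvLoopA : ∀ (m : Nat) (P : List Int) (x y : Int) (out : List Int),
    ((PySem.List.pyRange ((P.length : Int) + 2) ((P.length : Int) + 2 + m) 1).foldl
        pvStepA (P ++ [x, y], out)).2 = out ++ pvSq m x y := by
  intro m
  induction m with
  | zero =>
      intro P x y out
      rw [PySem.List.pyRange_one_eq_nil (by omega)]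
      simp [pvSq]
  | succ m ih =>
      intro P x y out
      rw [PySem.List.pyRange_one_cons (by push_cast; omega)]
      have h2 : ¬ ((P.length : Int) + 2 ≤ 1) := by omega
      have hx : PySem.List.pyGetD (P ++ [x, y]) ((P.length : Int) + 2 - 2) 0 = x := by
        have : (P.length : Int) + 2 - 2 = ((P.length : Nat) : Int) := by omega
        rw [this, PySem.List.pyGetD_natCast]
        simp [List.getD]
      have hy : PySem.List.pyGetD (P ++ [x, y]) ((P.length : Int) + 2 - 1) 0 = y := by
        have : (P.length : Int) + 2 - 1 = (((P.length + 1) : Nat) : Int) := by push_cast; omega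
        rw [this, PySem.List.pyGetD_natCast]
        simp [List.getD]
      have hassoc : (P ++ [x, y]) ++ [x + y] = (P ++ [x]) ++ [y, x + y] := by simp
      have hstep : pvStepA (P ++ [x, y], out) ((P.length : Int) + 2)
          = ((P ++ [x]) ++ [y, x + y], out ++ [(x + y) * (x + y)]) := by
        simp only [pvStepA, if_neg h2, hx, hy, hassoc]
        ring_nf
      rw [List.foldl_cons, hstep]
      have hlen : ((P ++ [x]).length : Int) = (P.length : Int) + 1 := by simp
      have := ih (P ++ [x]) y (x + y) (out ++ [(x + y) * (x + y)])
      rw [hlen] at this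
      have hrange : (P.length : Int) + 2 + 1 = (P.length : Int) + 1 + 2 := by omega
      have hrange2 : (P.length : Int) + 2 + ((m : Nat) + 1 : Nat) = (P.length : Int) + 1 + 2 + m := by
        push_cast; omega
      rw [hrange, hrange2, this]
      simp [pvSq]

theorem pvB_eq (n : Int) : square_fibonacci_alt n
    = (List.range n.toNat).map (fun k => ((Nat.fib (k + 1) : Int)) ^ 2) := by
  unfold square_fibonacci_alt
  rw [PySem.List.pyRange_one, List.map_map, show n - 0 = n from sub_zero n]
  refine List.map_congr_left fun k _ => ?_
  have h : ((0 : Int) + (k : Int) + 1).toNat = k + 1 := by omega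
  simp only [Function.comp, h, pvFibFD_eq]

theorem pvA_eq (n : Int) : square_fibonacci n
    = (List.range n.toNat).map (fun k => ((Nat.fib (k + 1) : Int)) ^ 2) := by
  unfold square_fibonacci
  by_cases h0 : n ≤ 0
  · rw [PySem.List.pyRange_one_eq_nil (by omega)]
    have : n.toNat = 0 := by omega
    simp [this]
  · rcases eq_or_lt_of_le (by omega : (1 : Int) ≤ n) with h1 | h1
    · rw [← h1]
      decide
    · have hn2 : (2 : Int) ≤ n := by omega
      rw [PySem.List.pyRange_one_cons (by omega : (0:Int) < n),
          PySem.List.pyRange_one_cons (by omega : (0:Int) + 1 < n)]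
      have hs0 : pvStepA ([], []) 0 = ([1], [1]) := by simp [pvStepA]
      have hs1 : pvStepA ([1], [1]) (0 + 1) = ([1, 1], [1, 1]) := by norm_num [pvStepA]
      rw [List.foldl_cons, hs0, List.foldl_cons, hs1]
      set m : Nat := (n - 2).toNat with hm
      have hn : n = (2 : Int) + m := by omega
      have hA := pvLoopA m [] 1 1 [1, 1]
      norm_num at hA
      rw [show (0 : Int) + 1 + 1 = 2 by norm_num, hn, hA]
      -- pvSq m 1 1 via fib (fib 1 = fib 2 = 1)
      have hsq : pvSq m 1 1 = (List.range m).map (fun j => ((Nat.fib (3 + j) : Int)) ^ 2) := by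
        have := pvSq_fib m 0
        norm_num [Nat.fib_one, Nat.fib_two] at this
        convert this using 2
      -- RHS: n.toNat = m + 2
      have hnt : (2 + (m : Int)).toNat = m + 2 := by omega
      rw [hnt, hsq]
      rw [show m + 2 = (m + 1) + 1 from rfl, List.range_succ_eq_map, List.range_succ_eq_map]
      simp only [List.map_cons, List.map_map]
      have hf1 : ((Nat.fib (0 + 1) : Int)) ^ 2 = 1 := by norm_num [Nat.fib_one]
      have hf2 : ((Nat.fib (Nat.succ 0 + 1) : Int)) ^ 2 = 1 := by norm_num [Nat.fib_two]
      simp only [hf1, hf2]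
      congr 1
      congr 1
      refine List.map_congr_left fun j _ => ?_
      simp only [Function.comp_apply]
      have e : 3 + j = j.succ.succ + 1 := by omega
      rw [e]

-- ===== VERDICT (by name: the statement is the Claim_ definition above) =====
theorem square_fibonacci_spec : Claim_equal_square_fibonacci := by
  intro n _
  unfold Spec_square_fibonacci
  rw [pvA_eq, pvB_eq]
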